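-- pv_equiv track=rewrite | github.com/bartneck/swiML | bookExamples/patterns/looks-and-say/look-and-say-digits-all-terms-csv.py | count_digits_for_all_terms
-- ===== SOURCE A (Python) =====
-- def count_digits(sequence):
--     count_1 = sequence.count('1')
--     count_2 = sequence.count('2')
--     count_3 = sequence.count('3')
--     return count_1, count_2, count_3
--
-- def look_and_say(n):
--     if n == 1:
--         return '1'
--     if n == 2:
--         return '11'
--
--     s = "11"
--     for _ in range(3, n + 1):
--         s += '$'
--         l = len(s)
--         cnt = 1
--         tmp = ""
--         for j in range(1, l):
--             if s[j] != s[j - 1]: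
--                 tmp += str(cnt + 0)
--                 tmp += s[j - 1]
--                 cnt = 1
--             else:
--                 cnt += 1
--         s = tmp
--
--     return s
--
-- def count_digits_for_all_terms(n_terms):
--     count_1_list = []
--     count_2_list = []
--     count_3_list = []
--     for i in range(1, n_terms + 1):
--         sequence = look_and_say(i)
--         count_1, count_2, count_3 = count_digits(sequence)
--         count_1_list.append(count_1)
--         count_2_list.append(count_2)
--         count_3_list.append(count_3)
--     return count_1_list, count_2_list, count_3_list
-- ===== SOURCE B (Python) =====
-- def count_digits_for_all_terms(n_terms):
--     # Incremental: keep the current term and derive the next one from it,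
--     # instead of regenerating every term from scratch.
--     count_1_list = []
--     count_2_list = []
--     count_3_list = []
--     s = '1'
--     for _ in range(n_terms):
--         count_1_list.append(s.count('1'))
--         count_2_list.append(s.count('2'))
--         count_3_list.append(s.count('3'))
--         s = _next_term(s)
--     return count_1_list, count_2_list, count_3_list
--
-- def _next_term(s):
--     # run-length encode s (s is never empty)
--     prev = s[0]
--     cnt = 1
--     out = []
--     for ch in s[1:]:
--         if ch == prev:
--             cnt += 1
--         else:
--             out.append(str(cnt))
--             out.append(prev)
--             prev = ch
--             cnt = 1
--     out.append(str(cnt))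
--     out.append(prev)
--     return ''.join(out)
-- ===== Notes on version B (the rewrite author's own statement) =====
-- stated objective: faster
-- what changed: B generates each look-and-say term incrementally from the previous term (one run-length pass per term, no sentinel) instead of recomputing every term from scratch as A's look_and_say does for each index; intended as faster (O(n*total_length) -> O(total_length)); a timing run measured B about five times faster at the largest size both finished, and neither finishes at larger sizes since term length grows exponentially.
import Mathlib
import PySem

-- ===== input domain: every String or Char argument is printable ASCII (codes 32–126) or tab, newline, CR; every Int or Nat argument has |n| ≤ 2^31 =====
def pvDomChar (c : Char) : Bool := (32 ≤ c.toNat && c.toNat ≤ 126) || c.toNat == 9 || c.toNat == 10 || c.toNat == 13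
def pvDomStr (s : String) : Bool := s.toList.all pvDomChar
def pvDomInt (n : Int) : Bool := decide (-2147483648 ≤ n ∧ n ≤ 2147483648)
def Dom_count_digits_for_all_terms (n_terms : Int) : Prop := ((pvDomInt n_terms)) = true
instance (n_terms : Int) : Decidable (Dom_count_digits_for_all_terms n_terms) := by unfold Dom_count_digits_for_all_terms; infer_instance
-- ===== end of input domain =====

-- B generates each look-and-say term incrementally from the previous one (one run-length
-- pass per term, no '$' sentinel) instead of regenerating every term from scratch as A does.

-- ===== PORT A =====
-- strings are held as List Char (PySem string ops are defined there); s.count('1') = PySem.Chars.count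
def pvCountDigitsA (sequence : List Char) : Int × Int × Int :=
  ((PySem.Chars.count sequence ['1'] : Int),
   (PySem.Chars.count sequence ['2'] : Int),
   (PySem.Chars.count sequence ['3'] : Int))

-- one pass of A's inner loop: s += '$'; for j in range(1, l): … (indices j, j-1 are always in range)
def pvLasInnerA (s : List Char) : List Char :=
  let s' := s ++ ['$']
  -- s' held as an Array for O(1) indexing, as Python strings have; tmp built by pushes, as
  -- Python's `tmp += …` is amortized O(1).  Indices j, j-1 lie in [0, l), so `.getD j.toNat`
  -- is exactly Python's s[j] here.
  let arr := s'.toArray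
  let l : Int := (s'.length : Int)
  ((PySem.List.pyRange 1 l).foldl (fun (st : Int × Array Char) j =>
      if arr.getD j.toNat ' ' ≠ arr.getD (j - 1).toNat ' ' then
        (1, (st.2 ++ (PySem.Int.toChars (st.1 + 0)).toArray).push (arr.getD (j - 1).toNat ' '))
      else (st.1 + 1, st.2)) ((1 : Int), (#[] : Array Char))).2.toList

def pvLookAndSayA (n : Int) : List Char :=
  if n = 1 then ['1']
  else if n = 2 then ['1', '1']
  else (PySem.List.pyRange 3 (n + 1)).foldl (fun s _ => pvLasInnerA s) ['1', '1']

def count_digits_for_all_terms (n_terms : Int) : List Int × List Int × List Int :=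
  (PySem.List.pyRange 1 (n_terms + 1)).foldl
    (fun (acc : List Int × List Int × List Int) i =>
      let cs := pvCountDigitsA (pvLookAndSayA i)
      (acc.1 ++ [cs.1], acc.2.1 ++ [cs.2.1], acc.2.2 ++ [cs.2.2]))
    ([], [], [])

-- ===== PORT B =====
-- _next_term: run-length encode s (s is never empty where B calls it)
def pvNextTermB (s : List Char) : List Char :=
  let prev0 := PySem.List.pyGetD s 0 ' '
  -- Python's `out` is a list with O(1) appends, joined at the end: held as an Array of chars
  let st := (PySem.List.slice s (some 1)).foldl
    (fun (st : Int × Char × Array Char) ch =>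
      if ch = st.2.1 then (st.1 + 1, st.2.1, st.2.2)
      else ((1 : Int), ch, (st.2.2 ++ (PySem.Int.toChars st.1).toArray).push st.2.1))
    ((1 : Int), prev0, (#[] : Array Char))
  ((st.2.2 ++ (PySem.Int.toChars st.1).toArray).push st.2.1).toList

def count_digits_for_all_terms_alt (n_terms : Int) : List Int × List Int × List Int :=
  ((PySem.List.pyRange 0 n_terms).foldl
    (fun (st : (List Int × List Int × List Int) × List Char) _ =>
      ((st.1.1 ++ [(PySem.Chars.count st.2 ['1'] : Int)],
        st.1.2.1 ++ [(PySem.Chars.count st.2 ['2'] : Int)],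
        st.1.2.2 ++ [(PySem.Chars.count st.2 ['3'] : Int)]),
       pvNextTermB st.2))
    (([], [], []), ['1'])).1

-- ===== PRECONDITION & SPEC =====
def Spec_count_digits_for_all_terms (n_terms : Int) (out : List Int × List Int × List Int) : Prop := out = count_digits_for_all_terms_alt n_terms
instance (n_terms : Int) (out : List Int × List Int × List Int) : Decidable (Spec_count_digits_for_all_terms n_terms out) := by unfold Spec_count_digits_for_all_terms; infer_instance

-- ===== CLAIM (what is proved, stated in full; the proofs are below) =====
def Claim_equal_count_digits_for_all_terms : Prop := ∀ (n_terms : Int), Dom_count_digits_for_all_terms n_terms → Spec_count_digits_for_all_terms n_terms (count_digits_for_all_terms n_terms)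

-- ===== LEMMAS AND PROOFS =====

-- the k-th look-and-say term (0-based), generated by B's step
def pvTerm (k : Nat) : List Char := pvNextTermB^[k] ['1']

theorem pv_digitChar_ne_dollar (m : Nat) : Nat.digitChar m ≠ '$' := by
  match m with
  | 0 => decide
  | 1 => decide
  | 2 => decide
  | 3 => decide
  | 4 => decide
  | 5 => decide
  | 6 => decide
  | 7 => decide
  | 8 => decide
  | 9 => decide
  | 10 => decide
  | 11 => decide
  | 12 => decide
  | 13 => decide
  | 14 => decide
  | 15 => decide
  | (n+16) =>
    unfold Nat.digitChar
    repeat rw [if_neg (by omega)]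
    decide

theorem pv_toDigitsCore_mem (b : Nat) : ∀ (f n : Nat) (ds : List Char) (c : Char),
    c ∈ Nat.toDigitsCore b f n ds → c ∈ ds ∨ ∃ m, c = Nat.digitChar m := by
  intro f
  induction f with
  | zero => intro n ds c h; exact Or.inl h
  | succ f ih =>
      intro n ds c h
      rw [Nat.toDigitsCore] at h
      by_cases h0 : n / b = 0
      · simp only [h0, if_pos rfl] at h
        rcases List.mem_cons.1 h with h | h
        · exact Or.inr ⟨n % b, h⟩
        · exact Or.inl h
      · simp only [if_neg h0] at h
        rcases ih _ _ _ h with h' | h'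
        · rcases List.mem_cons.1 h' with h'' | h''
          · exact Or.inr ⟨n % b, h''⟩
          · exact Or.inl h''
        · exact Or.inr h'


theorem pv_dollar_not_mem_toChars (n : Int) : '$' ∉ PySem.Int.toChars n := by
  intro h
  unfold PySem.Int.toChars Nat.toDigits at h
  by_cases hn : n < 0
  · rw [if_pos hn] at h
    rcases List.mem_cons.1 h with h | h
    · exact absurd h (by decide)
    · rcases pv_toDigitsCore_mem 10 _ _ _ _ h with h' | ⟨m, hm⟩
      · simp at h'
      · exact pv_digitChar_ne_dollar m hm.symm
  · rw [if_neg hn] at h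
    rcases pv_toDigitsCore_mem 10 _ _ _ _ h with h' | ⟨m, hm⟩
    · simp at h'
    · exact pv_digitChar_ne_dollar m hm.symm

theorem pv_arr_getD (t : List Char) (k : Nat) (d : Char) : t.toArray.getD k d = t.getD k d := by
  simp [Array.getD, List.getD]
  by_cases h : k < t.length
  · simp [h]
  · simp [h]

theorem pv_range_shape (t : List Char) :
    PySem.List.pyRange 1 (t.length : Int) = (List.range (t.length - 1)).map (fun (k : Nat) => ((k : Int) + 1)) := by
  rcases t with _ | ⟨a, u⟩
  · simp [PySem.List.pyRange]
  · simp only [PySem.List.pyRange, if_neg (by norm_num : ¬(1:Int) = 0)]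
    have h1 : ((a :: u).length : Int) = (u.length : Int) + 1 := by simp
    rw [h1]
    by_cases hu : 0 < u.length
    · rw [if_pos (by omega : (1:Int) < (u.length:Int)+1)]
      have h2 : (((u.length:Int) + 1 - 1 + 1 - 1) / 1).toNat = u.length := by omega
      rw [h2]
      have h3 : (a :: u).length - 1 = u.length := by simp
      rw [h3, if_pos (by norm_num : (0:Int) < 1)]
      apply List.map_congr_left
      intro k _
      ring
    · have h0 : u.length = 0 := by omega
      simp [h0]

theorem pv_map_pairs (t : List Char) :
    (PySem.List.pyRange 1 (t.length : Int)).map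
        (fun j => (t.toArray.getD (j - 1).toNat ' ', t.toArray.getD j.toNat ' '))
      = t.zip t.tail := by
  rw [pv_range_shape, List.map_map]
  apply List.ext_getElem
  · simp [List.length_zip]
  · intro k h1 h2
    simp only [List.getElem_map, List.getElem_range, Function.comp]
    have hk : k < t.length - 1 := by simpa using h1
    have e1 : ((k : Int) + 1 - 1).toNat = k := by omega
    have e2 : ((k : Int) + 1).toNat = k + 1 := by omega
    rw [e1, e2, pv_arr_getD, pv_arr_getD, List.getElem_zip, List.getElem_tail]
    rw [List.getD_eq_getElem _ _ (by omega), List.getD_eq_getElem _ _ (by omega)]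

def pvBodyB (st : Int × Char × List Char) (ch : Char) : Int × Char × List Char :=
  if ch = st.2.1 then (st.1 + 1, st.2.1, st.2.2)
  else ((1 : Int), ch, st.2.2 ++ PySem.Int.toChars st.1 ++ [st.2.1])

def pvBodyA (st : Int × List Char) (p : Char × Char) : Int × List Char :=
  if p.2 ≠ p.1 then (1, st.2 ++ PySem.Int.toChars (st.1 + 0) ++ [p.1])
  else (st.1 + 1, st.2)

theorem pv_scan_eq (u : List Char) : ∀ (prev : Char) (cnt : Int) (out : List Char),
    prev ≠ '$' → '$' ∉ u →
    ((List.zip (prev :: (u ++ ['$'])) (u ++ ['$'])).foldl pvBodyA (cnt, out)).2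
      = (let st := u.foldl pvBodyB (cnt, prev, out); st.2.2 ++ PySem.Int.toChars st.1 ++ [st.2.1]) := by
  induction u with
  | nil =>
      intro prev cnt out hp _
      simp [pvBodyA, pvBodyB, Ne.symm hp]
  | cons b u ih =>
      intro prev cnt out hp hu
      have hmem : ¬('$' = b) ∧ '$' ∉ u := by simpa using hu
      have hb : b ≠ '$' := Ne.symm hmem.1
      by_cases hbp : b = prev
      · subst hbp
        simpa [pvBodyA, pvBodyB] using ih b (cnt + 1) out hb hmem.2
      · simpa [pvBodyA, pvBodyB, hbp, Ne.symm hbp] using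
          ih b 1 (out ++ PySem.Int.toChars (cnt + 0) ++ [prev]) hb hmem.2

theorem pv_nextB_cons (a : Char) (u : List Char) :
    pvNextTermB (a :: u)
      = (let st := u.foldl pvBodyB ((1 : Int), a, ([] : List Char));
         st.2.2 ++ PySem.Int.toChars st.1 ++ [st.2.1]) := by
  unfold pvNextTermB
  rw [PySem.List.slice_from _ (by norm_num : (0:Int) ≤ 1)]
  have hp0 : PySem.List.pyGetD (a :: u) 0 ' ' = a := by
    simp [PySem.List.pyGetD, PySem.List.pyIdx?, PySem.List.pyGet?]
  have hom := List.foldl_hom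
      (f := fun (st : Int × Char × Array Char) => ((st.1, st.2.1, st.2.2.toList) : Int × Char × List Char))
      (g₁ := fun (st : Int × Char × Array Char) ch =>
        if ch = st.2.1 then (st.1 + 1, st.2.1, st.2.2)
        else ((1 : Int), ch, (st.2.2 ++ (PySem.Int.toChars st.1).toArray).push st.2.1))
      (g₂ := pvBodyB) (l := u) (init := ((1 : Int), a, (#[] : Array Char)))
      (by intro st ch
          unfold pvBodyB
          by_cases h : ch = st.2.1 <;> simp [h])
  simp only [hp0]
  rw [show (List.drop (Int.toNat 1) (a :: u)) = u from by simp]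
  have h2 := congrArg (fun (st : Int × Char × List Char) => st.2.2 ++ PySem.Int.toChars st.1 ++ [st.2.1]) hom
  simp only at h2
  simp only [Array.toList_push, Array.toList_append, List.append_assoc]
  simpa [List.append_assoc] using h2.symm

theorem pv_step_eq (s : List Char) (hne : s ≠ []) (hd : '$' ∉ s) :
    pvLasInnerA s = pvNextTermB s := by
  rcases s with _ | ⟨a, u⟩
  · exact absurd rfl hne
  · have hmem : ¬('$' = a) ∧ '$' ∉ u := by simpa using hd
    have hom := List.foldl_hom
        (f := fun (st : Int × Array Char) => ((st.1, st.2.toList) : Int × List Char))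
        (g₁ := fun (st : Int × Array Char) j =>
          if ((a :: u) ++ ['$']).toArray.getD j.toNat ' ' ≠ ((a :: u) ++ ['$']).toArray.getD (j - 1).toNat ' ' then
            (1, (st.2 ++ (PySem.Int.toChars (st.1 + 0)).toArray).push
                  (((a :: u) ++ ['$']).toArray.getD (j - 1).toNat ' '))
          else (st.1 + 1, st.2))
        (g₂ := fun st j => pvBodyA st
          (((a :: u) ++ ['$']).toArray.getD (j - 1).toNat ' ', ((a :: u) ++ ['$']).toArray.getD j.toNat ' '))
        (l := PySem.List.pyRange 1 ((((a :: u) ++ ['$']).length : Nat) : Int))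
        (init := ((1 : Int), (#[] : Array Char)))
        (by intro st j
            unfold pvBodyA
            simp only []
            split_ifs with h <;> simp [List.append_assoc])
    have hzip : (PySem.List.pyRange 1 ((((a :: u) ++ ['$']).length : Nat) : Int)).foldl
        (fun st j => pvBodyA st
          (((a :: u) ++ ['$']).toArray.getD (j - 1).toNat ' ', ((a :: u) ++ ['$']).toArray.getD j.toNat ' '))
        ((1 : Int), ([] : List Char))
        = (((a :: u) ++ ['$']).zip ((a :: u) ++ ['$']).tail).foldl pvBodyA ((1 : Int), ([] : List Char)) := by
      rw [← pv_map_pairs ((a :: u) ++ ['$']), List.foldl_map]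
    have h2 := congrArg (fun (st : Int × List Char) => st.2) (hom.symm.trans hzip)
    simp only at h2
    unfold pvLasInnerA
    rw [pv_nextB_cons]
    refine h2.trans ?_
    have hsc := pv_scan_eq u a 1 [] (Ne.symm hmem.1) hmem.2
    simpa using hsc

theorem pv_scanB_inv (u : List Char) : ∀ (prev : Char) (cnt : Int) (out : List Char),
    prev ≠ '$' → '$' ∉ u → '$' ∉ out →
    (u.foldl pvBodyB (cnt, prev, out)).2.1 ≠ '$' ∧ '$' ∉ (u.foldl pvBodyB (cnt, prev, out)).2.2 := by
  induction u with
  | nil => intro prev cnt out hp _ ho; exact ⟨hp, ho⟩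
  | cons b u ih =>
      intro prev cnt out hp hu ho
      have hmem : ¬('$' = b) ∧ '$' ∉ u := by simpa using hu
      by_cases hbp : b = prev
      · subst hbp
        simpa [pvBodyB] using ih b (cnt + 1) out (Ne.symm hmem.1) hmem.2 ho
      · have ho' : '$' ∉ out ++ PySem.Int.toChars cnt ++ [prev] := by
          simp [ho, pv_dollar_not_mem_toChars, Ne.symm hp]
        simpa [pvBodyB, hbp] using ih b 1 (out ++ PySem.Int.toChars cnt ++ [prev]) (Ne.symm hmem.1) hmem.2 ho'

theorem pv_stepB_keeps (s : List Char) (hne : s ≠ []) (hd : '$' ∉ s) :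
    pvNextTermB s ≠ [] ∧ '$' ∉ pvNextTermB s := by
  rcases s with _ | ⟨a, u⟩
  · exact absurd rfl hne
  · have hmem : ¬('$' = a) ∧ '$' ∉ u := by simpa using hd
    rw [pv_nextB_cons]
    have hinv := pv_scanB_inv u a 1 [] (Ne.symm hmem.1) hmem.2 (by simp)
    refine ⟨by simp, ?_⟩
    simp [hinv.1, hinv.2, pv_dollar_not_mem_toChars, Ne.symm hinv.1]

theorem pv_term_keeps (k : Nat) : pvTerm k ≠ [] ∧ '$' ∉ pvTerm k := by
  induction k with
  | zero => exact ⟨by decide, by decide⟩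
  | succ k ih =>
      have h : pvTerm (k + 1) = pvNextTermB (pvTerm k) := Function.iterate_succ_apply' _ _ _
      rw [h]; exact pv_stepB_keeps _ ih.1 ih.2

theorem pv_term_succ (k : Nat) : pvTerm (k + 1) = pvNextTermB (pvTerm k) :=
  Function.iterate_succ_apply' _ _ _

theorem pv_las_aux (m : Nat) (hm : 2 ≤ m) :
    (PySem.List.pyRange 3 ((m : Int) + 1)).foldl (fun s _ => pvLasInnerA s) ['1', '1'] = pvTerm (m - 1) := by
  induction m with
  | zero => omega
  | succ m ih =>
      by_cases hm2 : 2 ≤ m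
      · have hcast : ((m + 1 : Nat) : Int) + 1 = ((m : Int) + 1) + 1 := by push_cast; ring
        rw [hcast, PySem.List.pyRange_one_succ_right (by omega : (3:Int) ≤ (m : Int) + 1),
            List.foldl_append, ih hm2]
        have h1 : m - 1 + 1 = m := by omega
        simp only [List.foldl_cons, List.foldl_nil]
        rw [pv_step_eq _ (pv_term_keeps (m - 1)).1 (pv_term_keeps (m - 1)).2, ← pv_term_succ, h1]
        simp
      · have hm0 : m = 1 := by omega
        subst hm0
        have : ((2 : Nat) : Int) + 1 = 3 := by norm_num
        rw [this]
        have hr : PySem.List.pyRange 3 3 = [] := by simp [PySem.List.pyRange]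
        rw [hr]
        decide

theorem pv_las_eq (m : Nat) (hm : 1 ≤ m) : pvLookAndSayA (m : Int) = pvTerm (m - 1) := by
  by_cases h1 : m = 1
  · subst h1; decide
  · by_cases h2 : m = 2
    · subst h2; decide
    · have hm3 : 3 ≤ m := by omega
      unfold pvLookAndSayA
      rw [if_neg (by omega : ¬((m : Nat) : Int) = 1), if_neg (by omega : ¬((m : Nat) : Int) = 2)]
      exact pv_las_aux m (by omega)

theorem pv_A_outer (m : Nat) :
    count_digits_for_all_terms (m : Int)
      = ((List.range m).map (fun k => (PySem.Chars.count (pvTerm k) ['1'] : Int)),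
         (List.range m).map (fun k => (PySem.Chars.count (pvTerm k) ['2'] : Int)),
         (List.range m).map (fun k => (PySem.Chars.count (pvTerm k) ['3'] : Int))) := by
  unfold count_digits_for_all_terms
  induction m with
  | zero =>
      have hr : PySem.List.pyRange 1 ((0 : Nat) + 1 : Int) = [] := by simp [PySem.List.pyRange]
      simp [hr]
  | succ m ih =>
      have hcast : ((m + 1 : Nat) : Int) + 1 = ((m : Int) + 1) + 1 := by push_cast; ring
      rw [hcast, PySem.List.pyRange_one_succ_right (by omega : (1:Int) ≤ (m : Int) + 1),
          List.foldl_append, ih]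
      have hlas : pvLookAndSayA ((m : Int) + 1) = pvTerm m := by
        have : ((m : Int) + 1) = ((m + 1 : Nat) : Int) := by push_cast; ring
        rw [this, pv_las_eq (m + 1) (by omega)]
        simp
      simp [hlas, pvCountDigitsA, List.range_succ]

theorem pv_B_outer (m : Nat) :
    (PySem.List.pyRange 0 (m : Int)).foldl
      (fun (st : (List Int × List Int × List Int) × List Char) _ =>
        ((st.1.1 ++ [(PySem.Chars.count st.2 ['1'] : Int)],
          st.1.2.1 ++ [(PySem.Chars.count st.2 ['2'] : Int)],
          st.1.2.2 ++ [(PySem.Chars.count st.2 ['3'] : Int)]),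
         pvNextTermB st.2))
      (([], [], []), ['1'])
    = (((List.range m).map (fun k => (PySem.Chars.count (pvTerm k) ['1'] : Int)),
        (List.range m).map (fun k => (PySem.Chars.count (pvTerm k) ['2'] : Int)),
        (List.range m).map (fun k => (PySem.Chars.count (pvTerm k) ['3'] : Int))),
       pvTerm m) := by
  induction m with
  | zero =>
      have hr : PySem.List.pyRange 0 ((0 : Nat) : Int) = [] := by simp [PySem.List.pyRange]
      simp [hr]
      rfl
  | succ m ih =>
      have hcast : ((m + 1 : Nat) : Int) = (m : Int) + 1 := by push_cast; ring
      rw [hcast, PySem.List.pyRange_one_succ_right (by omega : (0:Int) ≤ (m : Int)),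
          List.foldl_append, ih]
      simp [List.range_succ, pv_term_succ]

-- ===== VERDICT (by name: the statement is the Claim_ definition above) =====
theorem count_digits_for_all_terms_spec : Claim_equal_count_digits_for_all_terms := by
  intro n _
  unfold Spec_count_digits_for_all_terms
  by_cases hn : n ≤ 0
  · have h1 : PySem.List.pyRange 1 (n + 1) = [] := by
      simp [PySem.List.pyRange, show ¬((1:Int) < n + 1) by omega]
    have h2 : PySem.List.pyRange 0 n = [] := by
      simp [PySem.List.pyRange, show ¬((0:Int) < n) by omega]
    unfold count_digits_for_all_terms count_digits_for_all_terms_alt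
    rw [h1, h2]
    rfl
  · have hn' : n = ((n.toNat : Nat) : Int) := by omega
    rw [hn']
    rw [pv_A_outer n.toNat]
    unfold count_digits_for_all_terms_alt
    rw [pv_B_outer n.toNat]
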